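-- pv_equiv track=rewrite | github.com/holistic-ai/holisticai | src/holisticai/bias/mitigation/inprocessing/fair_scoring_classifier/utils.py | get_max_y
-- ===== SOURCE A (Python) =====
-- def get_max_y(cur_x, x, y):
--     y = [y[i] for i, x in enumerate(x) if x == cur_x]
--
--     counts = [0 for i in range(len(y[0]))]
--
--     for i in range(len(y)):
--         y[i] = y[i].index(1)
--
--     for i in range(len(y)):
--         counts[y[i]] += 1
--
--     return counts.index(max(counts))
-- ===== SOURCE B (Python) =====
-- def get_max_y(cur_x, x, y):
--     idxs = sorted(row.index(1) for xi, row in zip(x, y) if xi == cur_x)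
--     best = idxs[0]
--     best_run = 0
--     cur = None
--     run = 0
--     for v in idxs:
--         if v == cur:
--             run += 1
--         else:
--             cur, run = v, 1
--         if run > best_run:
--             best, best_run = cur, run
--     return best
-- ===== Notes on version B (the rewrite author's own statement) =====
-- stated objective: alternative
-- what changed: Replaces A's dense counting array plus counts.index(max(counts)) with sort-then-scan: sort the filtered rows' first-1 indices and make one linear pass tracking the current run length and the best run, updating only on a strictly longer run so ties keep the smaller class index.
import Mathlib
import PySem

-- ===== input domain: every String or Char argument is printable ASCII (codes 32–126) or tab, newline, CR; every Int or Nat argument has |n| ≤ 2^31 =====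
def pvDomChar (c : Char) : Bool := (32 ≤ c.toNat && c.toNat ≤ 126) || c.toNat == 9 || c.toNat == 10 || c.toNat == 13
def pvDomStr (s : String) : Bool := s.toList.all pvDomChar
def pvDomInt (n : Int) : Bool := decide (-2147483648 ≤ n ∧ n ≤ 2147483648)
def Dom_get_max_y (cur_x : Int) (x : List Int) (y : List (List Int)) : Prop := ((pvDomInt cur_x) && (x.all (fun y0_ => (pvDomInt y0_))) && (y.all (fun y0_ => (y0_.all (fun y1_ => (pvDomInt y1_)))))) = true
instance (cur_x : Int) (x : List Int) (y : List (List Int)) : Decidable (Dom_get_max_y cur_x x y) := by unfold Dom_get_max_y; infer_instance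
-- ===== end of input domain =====

-- B replaces A's dense counting array (sized by len(y[0]), filled then argmaxed via
-- counts.index(max(counts))) with sort-then-scan: sort the matching rows' first-1 indices
-- and make one pass tracking run lengths, updating the best only on a strictly longer run
-- (alternative decomposition, same order of cost).


-- ===== PORT A =====
def get_max_y (cur_x : Int) (x : List Int) (y : List (List Int)) : Int :=
  -- y = [y[i] for i, x in enumerate(x) if x == cur_x]   (y[i] never raises inside Pre_)
  let ys : List (List Int) :=
    ((PySem.List.enumerate x).filter (fun p => p.2 == cur_x)).map
      (fun p => (PySem.List.pyGet? y p.1).getD [])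
  -- counts = [0 for i in range(len(y[0]))]              (y[0] never raises inside Pre_)
  let counts : List Int :=
    (PySem.List.pyRange 0 ((((PySem.List.pyGet? ys 0).getD []).length : Nat) : Int)).map (fun _ => 0)
  -- for i in range(len(y)): y[i] = y[i].index(1)        (.index never raises inside Pre_)
  let idxs : List Nat := ys.map (fun r => (PySem.List.index? r 1).getD 0)
  -- for i in range(len(y)): counts[y[i]] += 1           (in range inside Pre_)
  let counts1 := idxs.foldl (fun c j => c.set j (c.getD j 0 + 1)) counts
  -- return counts.index(max(counts))
  (((PySem.List.index? counts1 ((PySem.List.max? counts1 (fun v => v)).getD 0)).getD 0 : Nat) : Int)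

-- ===== PORT B =====
-- one iteration of B's scan: state = (best, best_run, cur, run)
def pvStepB (st : Nat × Nat × Option Nat × Nat) (v : Nat) : Nat × Nat × Option Nat × Nat :=
  -- if v == cur: run += 1 else: cur, run = v, 1    (cur equals some v afterwards in both branches)
  let run2 : Nat := if some v == st.2.2.1 then st.2.2.2 + 1 else 1
  -- if run > best_run: best, best_run = cur, run
  if st.2.1 < run2 then (v, run2, some v, run2) else (st.1, st.2.1, some v, run2)

def get_max_y_alt (cur_x : Int) (x : List Int) (y : List (List Int)) : Int :=
  -- idxs = sorted(row.index(1) for xi, row in zip(x, y) if xi == cur_x)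
  let idxs : List Nat :=
    PySem.List.sorted
      (((x.zip y).filter (fun p => p.1 == cur_x)).map
        (fun p => (PySem.List.index? p.2 1).getD 0))
      (fun v => v)
  match idxs with
  | [] => 0   -- best = idxs[0] raises IndexError here; outside Pre_
  | b0 :: _ =>
    -- best = idxs[0]; best_run = 0; cur = None; run = 0; for v in idxs: …
    let st := idxs.foldl pvStepB (b0, 0, none, 0)
    (st.1 : Int)

-- ===== PRECONDITION & SPEC =====
-- the rows of y whose x-entry matches cur_x (zip truncates; Pre_ makes this equal A's selection)
def pvRows (cur_x : Int) (x : List Int) (y : List (List Int)) : List (List Int) :=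
  ((x.zip y).filter (fun p => p.1 == cur_x)).map (fun p => p.2)

-- Pre_ = exactly the inputs where A returns: every matching index is a valid index into y
-- (else IndexError), at least one row matches (else y[0] is IndexError), every matching row
-- contains a 1 (else ValueError), and each row's first-1 position is a valid index into
-- counts, whose length is len(first matching row) (else IndexError).
def Pre_get_max_y (cur_x : Int) (x : List Int) (y : List (List Int)) : Prop :=
  (∀ i : Fin x.length, x[i] = cur_x → (i : Nat) < y.length) ∧
  pvRows cur_x x y ≠ [] ∧
  ∀ r ∈ pvRows cur_x x y,
    1 ∈ r ∧ (PySem.List.index? r 1).getD 0 < ((pvRows cur_x x y).headD []).length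

instance (cur_x : Int) (x : List Int) (y : List (List Int)) : Decidable (Pre_get_max_y cur_x x y) := by
  unfold Pre_get_max_y; infer_instance

def pvWitness_get_max_y : Int × List Int × List (List Int) := (1, [1, 0, 1], [[0, 1], [1, 0], [0, 1]])

def Spec_get_max_y (cur_x : Int) (x : List Int) (y : List (List Int)) (out : Int) : Prop := out = get_max_y_alt cur_x x y
instance (cur_x : Int) (x : List Int) (y : List (List Int)) (out : Int) : Decidable (Spec_get_max_y cur_x x y out) := by unfold Spec_get_max_y; infer_instance

-- ===== CLAIM (what is proved, stated in full; the proofs are below) =====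
def Claim_equal_get_max_y : Prop := ∀ (cur_x : Int) (x : List Int) (y : List (List Int)), Dom_get_max_y cur_x x y → Pre_get_max_y cur_x x y → Spec_get_max_y cur_x x y (get_max_y cur_x x y)

-- ===== LEMMAS AND PROOFS =====

theorem pvWitness_ok :
    Dom_get_max_y pvWitness_get_max_y.1 pvWitness_get_max_y.2.1 pvWitness_get_max_y.2.2 ∧
    Pre_get_max_y pvWitness_get_max_y.1 pvWitness_get_max_y.2.1 pvWitness_get_max_y.2.2 := by
  constructor <;> decide

-- --- small indexing facts ---
theorem pyGet?_zero_cons {α : Type} (a : α) (xs : List α) :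
    PySem.List.pyGet? (a :: xs) 0 = some a := by
  simp [PySem.List.pyGet?, PySem.List.pyIdx?]

theorem pyGet?_cons_succ {α : Type} (b : α) (ys : List α) (s : Int) (hs : 0 ≤ s) :
    PySem.List.pyGet? (b :: ys) (s + 1) = PySem.List.pyGet? ys s := by
  obtain ⟨n, rfl⟩ := Int.eq_ofNat_of_zero_le hs
  have h1 : (n : Int) + 1 = ((n + 1 : Nat) : Int) := by push_cast; ring
  rw [h1, PySem.List.pyGet?_natCast, PySem.List.pyGet?_natCast]
  simp

-- --- the filtered-rows lists of the two ports coincide under Pre_ ---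
theorem rows_shift (cur_x : Int) (xs : List Int) (b : List Int) (ys : List (List Int))
    (s : Int) (hs : 0 ≤ s) :
    ((PySem.List.enumerate xs (s + 1)).filter (fun p => p.2 == cur_x)).map
        (fun p => (PySem.List.pyGet? (b :: ys) p.1).getD [])
      = ((PySem.List.enumerate xs s).filter (fun p => p.2 == cur_x)).map
        (fun p => (PySem.List.pyGet? ys p.1).getD []) := by
  induction xs generalizing s with
  | nil => simp [PySem.List.enumerate]
  | cons a xs ih =>
    rw [PySem.List.enumerate_cons, PySem.List.enumerate_cons]
    by_cases ha : a = cur_x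
    · simp only [List.filter_cons, ha, beq_self_eq_true, if_pos, List.map_cons]
      rw [pyGet?_cons_succ b ys s hs, ih (s + 1) (by omega)]
    · simp only [List.filter_cons]
      have : ((a == cur_x) : Bool) = false := by simp [ha]
      rw [this]
      simp only [Bool.false_eq_true, if_false]
      exact ih (s + 1) (by omega)

theorem rows_eq (cur_x : Int) (x : List Int) (y : List (List Int))
    (h : ∀ i : Fin x.length, x[i] = cur_x → (i : Nat) < y.length) :
    ((PySem.List.enumerate x).filter (fun p => p.2 == cur_x)).map
        (fun p => (PySem.List.pyGet? y p.1).getD [])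
      = pvRows cur_x x y := by
  induction x generalizing y with
  | nil => simp [pvRows, PySem.List.enumerate]
  | cons a xs ih =>
    cases y with
    | nil =>
      have ha : a ≠ cur_x := fun hc => absurd (h ⟨0, by simp⟩ (by simpa using hc)) (by simp)
      have hxs : ∀ k (hk : k < xs.length), xs[k] ≠ cur_x := by
        intro k hk hc
        exact absurd (h ⟨k + 1, by simpa using Nat.succ_lt_succ hk⟩ (by simpa using hc)) (by simp)
      have hfil : ((PySem.List.enumerate (a :: xs)).filter (fun p => p.2 == cur_x)) = [] := by
        rw [List.filter_eq_nil_iff]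
        intro p hp
        rw [show PySem.List.enumerate (a :: xs) = PySem.List.enumerate (a :: xs) 0 from rfl,
          PySem.List.mem_enumerate_iff] at hp
        obtain ⟨k, hk, rfl⟩ := hp
        rcases k with _ | k
        · simpa using ha
        · simpa using hxs k (by simpa using Nat.lt_of_succ_lt_succ hk)
      rw [hfil]
      simp [pvRows]
    | cons b ys =>
      rw [show PySem.List.enumerate (a :: xs) = PySem.List.enumerate (a :: xs) 0 from rfl,
        PySem.List.enumerate_cons]
      have htail : ∀ i : Fin xs.length, xs[i] = cur_x → (i : Nat) < ys.length := by
        intro i hi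
        have := h ⟨(i : Nat) + 1, by simpa using Nat.succ_lt_succ i.isLt⟩ (by simpa using hi)
        simpa using Nat.lt_of_succ_lt_succ this
      have hshift := rows_shift cur_x xs b ys 0 le_rfl
      by_cases hb : a = cur_x
      · simp only [List.filter_cons, hb, beq_self_eq_true, if_pos, List.map_cons,
          pyGet?_zero_cons, Option.getD_some]
        rw [hshift, ih ys htail]
        simp [pvRows, List.filter_cons, hb]
      · simp only [List.filter_cons]
        have hbeq : ((a == cur_x) : Bool) = false := by simp [hb]
        rw [hbeq]
        simp only [Bool.false_eq_true, if_false]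
        rw [hshift, ih ys htail]
        simp [pvRows, List.filter_cons, hbeq]

-- --- A's counting loop computes List.count ---
theorem counts_fold (l : List Nat) (c : List Int) :
    (l.foldl (fun c j => c.set j (c.getD j 0 + 1)) c).length = c.length ∧
    ∀ j, j < c.length →
      (l.foldl (fun c j => c.set j (c.getD j 0 + 1)) c).getD j 0 = c.getD j 0 + (l.count j : Int) := by
  induction l generalizing c with
  | nil => simp
  | cons a l ih =>
    simp only [List.foldl_cons]
    obtain ⟨ihl, ihg⟩ := ih (c.set a (c.getD a 0 + 1))
    constructor
    · rw [ihl, List.length_set]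
    · intro j hj
      rw [ihg j (by rw [List.length_set]; exact hj)]
      have hset : (c.set a (c.getD a 0 + 1)).getD j 0 = c.getD j 0 + if a = j then 1 else 0 := by
        by_cases haj : a = j
        · subst haj
          rw [if_pos rfl, List.getD_eq_getElem?_getD, List.getElem?_set, if_pos rfl, if_pos hj]
          simp [List.getD_eq_getElem?_getD]
        · rw [if_neg haj, List.getD_eq_getElem?_getD, List.getElem?_set, if_neg haj,
            ← List.getD_eq_getElem?_getD, add_zero]
      rw [hset, List.count_cons]
      by_cases h : a = j <;> simp [h] <;> omega

-- --- B's scan: invariant over the processed (sorted) prefix ---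
-- state (best, best_run, cur, run) describes prefix p: cur is p's last (and maximal) value,
-- run its count, best_run the maximal count over p and best the least value achieving it.
def pvInvB (p : List Nat) (st : Nat × Nat × Option Nat × Nat) : Prop :=
  ∃ lastv, st.2.2.1 = some lastv ∧ (∀ v ∈ p, v ≤ lastv) ∧ lastv ∈ p ∧
    st.2.2.2 = p.count lastv ∧
    st.1 ∈ p ∧ st.2.1 = p.count st.1 ∧
    (∀ v ∈ p, p.count v ≤ st.2.1) ∧
    (∀ v ∈ p, p.count v = st.2.1 → st.1 ≤ v)

theorem scan_step (p : List Nat) (st : Nat × Nat × Option Nat × Nat) (a : Nat)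
    (hinv : pvInvB p st) (ha : ∀ v ∈ p, v ≤ a) :
    pvInvB (p ++ [a]) (pvStepB st a) := by
  obtain ⟨lastv, hcur, hmax, hlmem, hrun, hbmem, hbr, hub, hmin⟩ := hinv
  have hbrpos : 1 ≤ st.2.1 := by
    rw [hbr]; exact List.count_pos_iff.mpr hbmem
  by_cases heq : a = lastv
  · -- run of the same value continues
    subst heq
    have hstep : pvStepB st a =
        if st.2.1 < p.count a + 1 then (a, p.count a + 1, some a, p.count a + 1)
        else (st.1, st.2.1, some a, p.count a + 1) := by
      simp [pvStepB, hcur, hrun]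
    have hca : (p ++ [a]).count a = p.count a + 1 := by simp
    have hcne : ∀ v, v ≠ a → (p ++ [a]).count v = p.count v := by
      intro v hv; simp [List.count_append, List.count_singleton, Ne.symm hv]
    by_cases hlt : st.2.1 < p.count a + 1
    · rw [hstep, if_pos hlt]
      dsimp only [pvInvB]
      refine ⟨a, rfl, ?_, by simp, by simp [hca], by simp, by simp [hca], ?_, ?_⟩
      · intro v hv; rcases List.mem_append.mp hv with h | h
        · exact hmax v h
        · simp at h; omega
      · intro v hv
        by_cases hva : v = a
        · subst hva; simp [hca]
        · rw [hcne v hva]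
          have := hub v (by rcases List.mem_append.mp hv with h | h; exact h; simp at h; omega)
          omega
      · intro v hv hc
        by_cases hva : v = a
        · omega
        · rw [hcne v hva] at hc
          have := hub v (by rcases List.mem_append.mp hv with h | h; exact h; simp at h; omega)
          omega
    · rw [hstep, if_neg hlt]
      have hbna : st.1 ≠ a := by
        intro hba
        rw [hba] at hbr
        omega
      dsimp only [pvInvB]
      refine ⟨a, rfl, ?_, by simp, by simp [hca], by simp [hbmem], by rw [hcne _ hbna]; exact hbr, ?_, ?_⟩
      · intro v hv; rcases List.mem_append.mp hv with h | h
        · exact hmax v h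
        · simp at h; omega
      · intro v hv
        by_cases hva : v = a
        · subst hva; rw [hca]; omega
        · rw [hcne v hva]
          exact hub v (by rcases List.mem_append.mp hv with h | h; exact h; simp at h; omega)
      · intro v hv hc
        by_cases hva : v = a
        · subst hva
          exact hmax st.1 hbmem
        · rw [hcne v hva] at hc
          exact hmin v (by rcases List.mem_append.mp hv with h | h; exact h; simp at h; omega) hc
  · -- a new, strictly larger value starts a run of length 1
    have hla : lastv < a := lt_of_le_of_ne (ha lastv hlmem) (fun h => heq h.symm)
    have hanp : a ∉ p := fun hap => absurd (hmax a hap) (by omega)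
    have hca : (p ++ [a]).count a = 1 := by
      simp [List.count_append, List.count_eq_zero_of_not_mem hanp]
    have hcne : ∀ v, v ≠ a → (p ++ [a]).count v = p.count v := by
      intro v hv; simp [List.count_append, List.count_singleton, Ne.symm hv]
    have hstep : pvStepB st a =
        if st.2.1 < 1 then (a, 1, some a, 1) else (st.1, st.2.1, some a, 1) := by
      have : (some a == st.2.2.1) = false := by
        rw [hcur]; simp [fun h : a = lastv => heq h]
      simp [pvStepB, this]
    rw [hstep, if_neg (by omega)]
    have hbna : st.1 ≠ a := fun h => hanp (h ▸ hbmem)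
    dsimp only [pvInvB]
    refine ⟨a, rfl, ?_, by simp, by simp [hca], by simp [hbmem], by rw [hcne _ hbna]; exact hbr, ?_, ?_⟩
    · intro v hv; rcases List.mem_append.mp hv with h | h
      · exact le_of_lt (lt_of_le_of_lt (hmax v h) hla)
      · simp at h; omega
    · intro v hv
      by_cases hva : v = a
      · subst hva; omega
      · rw [hcne v hva]
        exact hub v (by rcases List.mem_append.mp hv with h | h; exact h; simp at h; omega)
    · intro v hv hc
      by_cases hva : v = a
      · subst hva
        exact le_of_lt (lt_of_le_of_lt (hmax st.1 hbmem) hla)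
      · rw [hcne v hva] at hc
        exact hmin v (by rcases List.mem_append.mp hv with h | h; exact h; simp at h; omega) hc

theorem scan_fold (t p : List Nat) (st : Nat × Nat × Option Nat × Nat)
    (hinv : pvInvB p st) (hord : ∀ a ∈ t, ∀ v ∈ p, v ≤ a) (hsort : t.Pairwise (· ≤ ·)) :
    pvInvB (p ++ t) (t.foldl pvStepB st) := by
  induction t generalizing p st with
  | nil => simpa using hinv
  | cons a t ih =>
    rw [List.foldl_cons]
    have h1 := scan_step p st a hinv (hord a (by simp))
    have h2 : ∀ b ∈ t, ∀ v ∈ p ++ [a], v ≤ b := by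
      intro b hb v hv
      rcases List.mem_append.mp hv with h | h
      · exact hord b (by simp [hb]) v h
      · simp at h; subst h
        exact (List.pairwise_cons.mp hsort).1 b hb
    have := ih (p ++ [a]) (pvStepB st a) h1 h2 (List.pairwise_cons.mp hsort).2
    simpa using this

-- the whole scan of a nonempty sorted list
theorem scan_whole (b0 : Nat) (t : List Nat) (hsort : (b0 :: t).Pairwise (· ≤ ·)) :
    pvInvB (b0 :: t) ((b0 :: t).foldl pvStepB (b0, 0, none, 0)) := by
  rw [List.foldl_cons]
  have h1 : pvStepB (b0, 0, (none : Option Nat), 0) b0 = (b0, 1, some b0, 1) := by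
    simp [pvStepB]
  rw [h1]
  have hstart : pvInvB [b0] (b0, 1, some b0, 1) := by
    refine ⟨b0, rfl, by simp, by simp, by simp, by simp, by simp, by simp, by simp⟩
  have hord : ∀ a ∈ t, ∀ v ∈ [b0], v ≤ a := by
    intro a ha v hv
    simp at hv; subst hv
    exact (List.pairwise_cons.mp hsort).1 a ha
  simpa using scan_fold t [b0] (b0, 1, some b0, 1) hstart hord (List.pairwise_cons.mp hsort).2

-- ===== VERDICT (by name: the statement is the Claim_ definition above) =====
theorem get_max_y_spec : Claim_equal_get_max_y := by
  intro cur_x x y _hdom hpre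
  obtain ⟨h1, h2, h3⟩ := hpre
  obtain ⟨r0, Rt, hR0⟩ : ∃ r0 Rt, pvRows cur_x x y = r0 :: Rt := by
    cases hc : pvRows cur_x x y with
    | nil => exact absurd hc h2
    | cons a t => exact ⟨a, t, rfl⟩
  -- the list of class indices of the filtered rows, and the class range
  set l : List Nat := (pvRows cur_x x y).map (fun r => (PySem.List.index? r 1).getD 0) with hldef
  set n : Nat := r0.length with hndef
  have hln : ∀ v ∈ l, v < n := by
    intro v hv
    rw [hldef, List.mem_map] at hv
    obtain ⟨r, hr, rfl⟩ := hv
    have := (h3 r hr).2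
    rwa [hR0] at this
  set v0 : Nat := (PySem.List.index? r0 1).getD 0 with hv0def
  have hv0l : v0 ∈ l := by
    rw [hldef, hR0]
    exact List.mem_map_of_mem (by simp)
  have hn0 : 0 < n := lt_of_le_of_lt (Nat.zero_le _) (hln v0 hv0l)
  -- ===== A side =====
  obtain ⟨hCFlen0, hCFget0⟩ := counts_fold l (List.replicate n 0)
  set CF : List Int := l.foldl (fun c j => c.set j (c.getD j 0 + 1)) (List.replicate n 0)
    with hCFdef
  have hCFlen : CF.length = n := by rw [hCFlen0, List.length_replicate]
  have hCFget : ∀ j, j < n → CF.getD j 0 = (l.count j : Int) := by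
    intro j hj
    rw [hCFget0 j (by simpa using hj)]
    simp [List.getD_eq_getElem?_getD, List.getElem?_replicate, hj]
  have hCFne : CF ≠ [] := by
    intro hnil
    rw [hnil] at hCFlen
    simp at hCFlen
    omega
  obtain ⟨m0, hmaxo⟩ : ∃ m0, PySem.List.max? CF (fun v => v) = some m0 := by
    cases hc : PySem.List.max? CF (fun v => v) with
    | none => exact absurd ((PySem.List.max?_eq_none_iff _ _).mp hc) hCFne
    | some m => exact ⟨m, rfl⟩
  have hub : ∀ j, j < n → (l.count j : Int) ≤ m0 := by
    intro j hj
    have hjlen : j < CF.length := by omega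
    have hle := PySem.List.max?_isMax hmaxo _ (List.getElem_mem hjlen)
    calc (l.count j : Int) = CF.getD j 0 := (hCFget j hj).symm
      _ = CF[j] := List.getD_eq_getElem CF 0 hjlen
      _ ≤ m0 := hle
  have hm0pos : (1 : Int) ≤ m0 := by
    refine le_trans ?_ (hub v0 (hln v0 hv0l))
    exact_mod_cast List.count_pos_iff.mpr hv0l
  obtain ⟨kA, hkAeq⟩ := Option.isSome_iff_exists.mp
    ((PySem.List.index?_isSome_iff _ _).mpr (PySem.List.max?_mem hmaxo))
  obtain ⟨hkAlt, hkAval, hkAmin⟩ := PySem.List.getElem_of_index?_eq_some hkAeq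
  have hkAn : kA < n := by omega
  have hkAcount : (l.count kA : Int) = m0 := by
    calc (l.count kA : Int) = CF.getD kA 0 := (hCFget kA hkAn).symm
      _ = CF[kA] := List.getD_eq_getElem CF 0 hkAlt
      _ = m0 := hkAval
  have hkAmin' : ∀ j, j < kA → (l.count j : Int) ≠ m0 := by
    intro j hjk hc
    have hjn : j < n := lt_trans hjk hkAn
    apply hkAmin j hjk
    rw [← List.getD_eq_getElem CF 0 (by omega), hCFget j hjn]
    exact hc
  have hAeq : get_max_y cur_x x y = (kA : Int) := by
    simp only [get_max_y]
    rw [rows_eq cur_x x y h1]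
    rw [show (PySem.List.pyGet? (pvRows cur_x x y) 0).getD [] = r0 by
      rw [hR0, pyGet?_zero_cons]; rfl]
    rw [← hndef, ← hldef]
    rw [show (PySem.List.pyRange 0 ((n : Nat) : Int)).map (fun _ => (0 : Int))
        = List.replicate n 0 by
      refine List.eq_replicate_iff.mpr ⟨?_, ?_⟩
      · simp [PySem.List.length_pyRange_one]
      · intro b hb
        rw [List.mem_map] at hb
        obtain ⟨a, ha, hab⟩ := hb
        exact hab.symm]
    rw [← hCFdef, hmaxo]
    simp only [Option.getD_some]
    rw [hkAeq]
    rfl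
  -- ===== B side =====
  have hmapeq : (((x.zip y).filter (fun p => p.1 == cur_x)).map
      (fun p : Int × List Int => (PySem.List.index? p.2 1).getD 0)) = l := by
    rw [hldef]
    simp [pvRows, List.map_map, Function.comp]
  set s : List Nat := PySem.List.sorted l (fun v => v) with hsdef
  have hperm : s.Perm l := PySem.List.sorted_perm l (fun v => v) false
  have hcount : ∀ v, s.count v = l.count v := fun v => hperm.count_eq v
  have hsort : s.Pairwise (· ≤ ·) := by
    have := PySem.List.sorted_pairwise l (fun v => v)
    simpa using this
  have hsne : s ≠ [] := by
    intro hnil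
    rw [hsdef, PySem.List.sorted_eq_nil_iff] at hnil
    exact absurd (hnil ▸ hv0l) (by simp)
  obtain ⟨b0, t, hst⟩ : ∃ b0 t, s = b0 :: t := by
    cases hc : s with
    | nil => exact absurd hc hsne
    | cons a t => exact ⟨a, t, rfl⟩
  have hinv := scan_whole b0 t (hst ▸ hsort)
  obtain ⟨lastv, _, _, _, _, hbmem, hbr, hubB, hminB⟩ := hinv
  set R : Nat × Nat × Option Nat × Nat := (b0 :: t).foldl pvStepB (b0, 0, none, 0) with hRdef
  have hBeq : get_max_y_alt cur_x x y = (R.1 : Int) := by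
    simp only [get_max_y_alt]
    rw [hmapeq, ← hsdef, hst]
  -- ===== bridge =====
  have hmemRl : R.1 ∈ l := hperm.mem_iff.mp (hst ▸ hbmem)
  have hkAl : kA ∈ l := by
    by_contra hc
    rw [List.count_eq_zero_of_not_mem hc] at hkAcount
    simp at hkAcount
    omega
  have hkAs : kA ∈ (b0 :: t) := hst ▸ hperm.mem_iff.mpr hkAl
  have hcntR : ((b0 :: t).count R.1 : Int) = (l.count R.1 : Int) := by
    rw [← hst, hcount]
  -- R.2.1 = max count; show it equals m0 (as Int)
  have hRbr : (R.2.1 : Int) = (l.count R.1 : Int) := by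
    rw [hbr, ← hst, hcount]
  have h6 : (R.2.1 : Int) ≤ m0 := by
    rw [hRbr]
    exact hub R.1 (hln R.1 hmemRl)
  have h5 : m0 ≤ (R.2.1 : Int) := by
    have := hubB kA hkAs
    have hc : ((b0 :: t).count kA : Int) = (l.count kA : Int) := by rw [← hst, hcount]
    have : ((b0 :: t).count kA : Int) ≤ (R.2.1 : Int) := by exact_mod_cast this
    rw [hc, hkAcount] at this
    exact this
  have h7 : (R.2.1 : Int) = m0 := le_antisymm h6 h5
  -- minimality both ways
  have h8 : R.1 ≤ kA := by
    apply hminB kA hkAs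
    have : ((b0 :: t).count kA : Int) = (R.2.1 : Int) := by
      rw [← hst, hcount, hkAcount, h7]
    exact_mod_cast this
  have h9 : kA ≤ R.1 := by
    by_contra hcon
    push_neg at hcon
    apply hkAmin' R.1 hcon
    rw [← hRbr, h7]
  have : R.1 = kA := le_antisymm h8 h9
  show get_max_y cur_x x y = get_max_y_alt cur_x x y
  rw [hAeq, hBeq, this]
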